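-- pv_equiv track=rewrite | github.com/haruki439/Automatic-crossword-generation-using-themes | system/crossword_builder.py | fill_remaining_empty_cells
-- ===== SOURCE A (Python) =====
-- GRID_SIZE = 5
--
-- def would_create_black_line(grid, x, y):
--     left_black = 0
--     for i in range(x-1, -1, -1):
--         if grid[y][i] == 1:
--             left_black += 1
--         else:
--             break
--
--     right_black = 0
--     for i in range(x+1, GRID_SIZE):
--         if grid[y][i] == 1:
--             right_black += 1
--         else:
--             break
--
--     if left_black + right_black + 1 >= GRID_SIZE:
--         return True
--
--     top_black = 0
--     for i in range(y-1, -1, -1):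
--         if grid[i][x] == 1:
--             top_black += 1
--         else:
--             break
--
--     bottom_black = 0
--     for i in range(y+1, GRID_SIZE):
--         if grid[i][x] == 1:
--             bottom_black += 1
--         else:
--             break
--
--     if top_black + bottom_black + 1 >= GRID_SIZE:
--         return True
--
--     return False
--
-- def fill_remaining_empty_cells(grid):
--     count = 0
--     for y in range(GRID_SIZE):
--         for x in range(GRID_SIZE):
--             if grid[y][x] is None:
--                 if not would_create_black_line(grid, x, y):
--                     grid[y][x] = 1
--                     count += 1
--     return count
-- ===== SOURCE B (Python) =====
-- GRID_SIZE = 5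
--
-- def fill_remaining_empty_cells(grid):
--     count = 0
--     for y in range(GRID_SIZE):
--         for x in range(GRID_SIZE):
--             if grid[y][x] is None:
--                 row_full = all(grid[y][i] == 1 for i in range(GRID_SIZE) if i != x)
--                 col_full = all(grid[i][x] == 1 for i in range(GRID_SIZE) if i != y)
--                 if not (row_full or col_full):
--                     grid[y][x] = 1
--                     count += 1
--     return count
-- ===== Notes on version B (the rewrite author's own statement) =====
-- stated objective: simpler
-- what changed: The four directional contiguous-run-counting loops with breaks are replaced by two whole-line all() scans (a run of length GRID_SIZE-1 around a cell exists iff every other cell of that fixed-width line is 1), removing the helper entirely.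
import Mathlib
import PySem

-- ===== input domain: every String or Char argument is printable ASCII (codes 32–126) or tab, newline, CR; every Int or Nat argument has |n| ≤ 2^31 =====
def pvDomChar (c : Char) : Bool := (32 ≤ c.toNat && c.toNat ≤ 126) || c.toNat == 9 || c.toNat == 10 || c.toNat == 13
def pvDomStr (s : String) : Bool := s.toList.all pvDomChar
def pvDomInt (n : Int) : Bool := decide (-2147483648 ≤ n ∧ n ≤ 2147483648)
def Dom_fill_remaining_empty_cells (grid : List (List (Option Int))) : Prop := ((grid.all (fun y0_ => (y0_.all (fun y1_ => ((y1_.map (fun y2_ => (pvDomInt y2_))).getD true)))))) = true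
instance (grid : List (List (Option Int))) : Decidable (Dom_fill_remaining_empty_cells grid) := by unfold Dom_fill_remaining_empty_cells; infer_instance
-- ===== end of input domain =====

-- B replaces A's four contiguous-run-counting loops by two whole-line all() scans (equivalent on
-- the fixed 5-wide grid); both versions mutate `grid` in place identically — the equivalence
-- proved here is about the returned count, with the evolving grid threaded as fold state.

-- ===== PORT A =====
-- grid[y][x] for the nonnegative indices A uses; out of range only outside Pre_
def cellA (g : List (List (Option Int))) (y x : Nat) : Option Int := (g.getD y []).getD x none

-- `for i in range(x-1, -1, -1): … else break` run counter (used for the left and top loops)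
def runDec (f : Nat → Option Int) : Nat → Nat
  | 0 => 0
  | x + 1 => if f x = some 1 then runDec f x + 1 else 0

-- `for i in range(i0, GRID_SIZE): … else break` run counter (used for the right and bottom loops)
def runInc (f : Nat → Option Int) (i : Nat) : Nat :=
  if _h : i < 5 then (if f i = some 1 then runInc f (i + 1) + 1 else 0) else 0
  termination_by 5 - i

def would_create_black_line (g : List (List (Option Int))) (x y : Nat) : Bool :=
  let left_black := runDec (fun i => cellA g y i) x
  let right_black := runInc (fun i => cellA g y i) (x + 1)
  if 5 ≤ left_black + right_black + 1 then true
  else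
    let top_black := runDec (fun i => cellA g i x) y
    let bottom_black := runInc (fun i => cellA g i x) (y + 1)
    if 5 ≤ top_black + bottom_black + 1 then true else false

def stepA (s : List (List (Option Int)) × Int) (y x : Nat) : List (List (Option Int)) × Int :=
  if cellA s.1 y x = none then
    if would_create_black_line s.1 x y = false then
      (s.1.modify y (fun row => row.set x (some 1)), s.2 + 1)
    else s
  else s

def fill_remaining_empty_cells (grid : List (List (Option Int))) : Int :=
  ((List.range 5).foldl (fun s y => (List.range 5).foldl (fun s x => stepA s y x) s) (grid, 0)).2

-- ===== PORT B =====
def cellB (g : List (List (Option Int))) (y x : Nat) : Option Int := (g.getD y []).getD x none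

-- `all(f i == 1 for i in range(GRID_SIZE) if i != skip)`
def lineFull (f : Nat → Option Int) (skip : Nat) : Bool :=
  (List.range 5).all (fun i => i == skip || f i == some 1)

def stepB (s : List (List (Option Int)) × Int) (y x : Nat) : List (List (Option Int)) × Int :=
  if cellB s.1 y x = none then
    let row_full := lineFull (fun i => cellB s.1 y i) x
    let col_full := lineFull (fun i => cellB s.1 i x) y
    if (row_full || col_full) = false then
      (s.1.modify y (fun row => row.set x (some 1)), s.2 + 1)
    else s
  else s

def fill_remaining_empty_cells_alt (grid : List (List (Option Int))) : Int :=
  ((List.range 5).foldl (fun s y => (List.range 5).foldl (fun s x => stepB s y x) s) (grid, 0)).2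

-- ===== PRECONDITION & SPEC =====
-- A indexes grid[y][x] for all 0 ≤ y,x < 5, so it raises IndexError exactly when the grid has
-- fewer than 5 rows or one of the first 5 rows has fewer than 5 entries.
def Pre_fill_remaining_empty_cells (grid : List (List (Option Int))) : Prop :=
  5 ≤ grid.length ∧ ∀ r ∈ grid.take 5, 5 ≤ r.length
instance (grid : List (List (Option Int))) : Decidable (Pre_fill_remaining_empty_cells grid) := by
  unfold Pre_fill_remaining_empty_cells; infer_instance

def pvWitness_fill_remaining_empty_cells : List (List (Option Int)) :=
  List.replicate 5 (List.replicate 5 none)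

def Spec_fill_remaining_empty_cells (grid : List (List (Option Int))) (out : Int) : Prop := out = fill_remaining_empty_cells_alt grid
instance (grid : List (List (Option Int))) (out : Int) : Decidable (Spec_fill_remaining_empty_cells grid out) := by unfold Spec_fill_remaining_empty_cells; infer_instance

-- ===== CLAIM (what is proved, stated in full; the proofs are below) =====
def Claim_equal_fill_remaining_empty_cells : Prop := ∀ (grid : List (List (Option Int))), Dom_fill_remaining_empty_cells grid → Pre_fill_remaining_empty_cells grid → Spec_fill_remaining_empty_cells grid (fill_remaining_empty_cells grid)

-- ===== LEMMAS AND PROOFS =====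

theorem runDec_le (f : Nat → Option Int) (x : Nat) : runDec f x ≤ x := by
  induction x with
  | zero => simp [runDec]
  | succ x ih => simp only [runDec]; split <;> omega

theorem runDec_eq_iff (f : Nat → Option Int) (x : Nat) :
    runDec f x = x ↔ ∀ i, i < x → f i = some 1 := by
  induction x with
  | zero => simp [runDec]
  | succ x ih =>
    simp only [runDec]
    split
    · rename_i h
      constructor
      · intro he i hi
        rcases Nat.lt_succ_iff_lt_or_eq.mp hi with hi | hi
        · exact (ih.mp (by omega)) i hi
        · simpa [hi] using h
      · intro hall
        have : runDec f x = x := ih.mpr (fun i hi => hall i (by omega))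
        omega
    · rename_i h
      constructor
      · omega
      · intro hall; exact absurd (hall x (by omega)) h

theorem runInc_le (f : Nat → Option Int) (i : Nat) : runInc f i ≤ 5 - i := by
  fun_induction runInc f i with
  | case1 i h h1 ih => omega
  | case2 i h h1 => omega
  | case3 i h => omega

theorem runInc_eq_iff (f : Nat → Option Int) (i : Nat) :
    runInc f i = 5 - i ↔ ∀ j, i ≤ j → j < 5 → f j = some 1 := by
  fun_induction runInc f i with
  | case1 i h h1 ih =>
    constructor
    · intro he j hij hj5
      rcases Nat.eq_or_lt_of_le hij with rfl | hij
      · exact h1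
      · exact ih.mp (by omega) j hij hj5
    · intro hall
      have : runInc f (i + 1) = 5 - (i + 1) := ih.mpr (fun j hij hj5 => hall j (by omega) hj5)
      omega
  | case2 i h h1 =>
    constructor
    · omega
    · intro hall; exact absurd (hall i (le_refl _) h) h1
  | case3 i h =>
    constructor
    · intro _ j hij hj5; omega
    · intro _; omega

theorem run_sum_iff (f : Nat → Option Int) (x : Nat) (hx : x < 5) :
    (5 ≤ runDec f x + runInc f (x + 1) + 1) ↔ ∀ i, i < 5 → i ≠ x → f i = some 1 := by
  have hd := runDec_le f x
  have hi := runInc_le f (x + 1)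
  constructor
  · intro h i hi5 hne
    have h1 : runDec f x = x := by omega
    have h2 : runInc f (x + 1) = 5 - (x + 1) := by omega
    rcases Nat.lt_or_ge i x with hlt | hge
    · exact (runDec_eq_iff f x).mp h1 i hlt
    · exact (runInc_eq_iff f (x + 1)).mp h2 i (by omega) hi5
  · intro hall
    have h1 : runDec f x = x := (runDec_eq_iff f x).mpr (fun i hix => hall i (by omega) (by omega))
    have h2 : runInc f (x + 1) = 5 - (x + 1) :=
      (runInc_eq_iff f (x + 1)).mpr (fun j hj hj5 => hall j hj5 (by omega))
    omega

theorem lineFull_iff (f : Nat → Option Int) (skip : Nat) :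
    lineFull f skip = true ↔ ∀ i, i < 5 → i ≠ skip → f i = some 1 := by
  simp only [lineFull, List.all_eq_true, List.mem_range, Bool.or_eq_true, beq_iff_eq]
  constructor
  · intro h i h5 hne
    rcases h i h5 with h' | h'
    · exact absurd h' hne
    · exact h'
  · intro h i h5
    by_cases hi : i = skip
    · exact Or.inl hi
    · exact Or.inr (h i h5 hi)

theorem would_eq (g : List (List (Option Int))) (x y : Nat) (hx : x < 5) (hy : y < 5) :
    would_create_black_line g x y =
      (lineFull (fun i => cellA g y i) x || lineFull (fun i => cellA g i x) y) := by
  simp only [would_create_black_line]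
  by_cases h1 : 5 ≤ runDec (fun i => cellA g y i) x + runInc (fun i => cellA g y i) (x + 1) + 1
  · have : lineFull (fun i => cellA g y i) x = true :=
      (lineFull_iff _ _).mpr ((run_sum_iff _ x hx).mp h1)
    simp [h1, this]
  · have hr : lineFull (fun i => cellA g y i) x = false := by
      rw [Bool.eq_false_iff]
      intro hc
      exact h1 ((run_sum_iff _ x hx).mpr ((lineFull_iff _ _).mp hc))
    by_cases h2 : 5 ≤ runDec (fun i => cellA g i x) y + runInc (fun i => cellA g i x) (y + 1) + 1
    · have : lineFull (fun i => cellA g i x) y = true :=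
        (lineFull_iff _ _).mpr ((run_sum_iff _ y hy).mp h2)
      simp [h1, h2, hr, this]
    · have hc : lineFull (fun i => cellA g i x) y = false := by
        rw [Bool.eq_false_iff]
        intro hc
        exact h2 ((run_sum_iff _ y hy).mpr ((lineFull_iff _ _).mp hc))
      simp [h1, h2, hr, hc]

theorem step_eq (s : List (List (Option Int)) × Int) (y x : Nat) (hy : y < 5) (hx : x < 5) :
    stepA s y x = stepB s y x := by
  simp only [stepA, stepB, cellB, cellA, would_eq s.1 x y hx hy]
  rfl

-- ===== VERDICT (by name: the statement is the Claim_ definition above) =====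
theorem fill_remaining_empty_cells_spec : Claim_equal_fill_remaining_empty_cells := by
  intro grid _ _
  show fill_remaining_empty_cells grid = fill_remaining_empty_cells_alt grid
  unfold fill_remaining_empty_cells fill_remaining_empty_cells_alt
  apply congrArg Prod.snd
  apply PySem.List.foldl_congr_mem
  intro s y hy
  apply PySem.List.foldl_congr_mem
  intro s' x hx
  exact step_eq s' y x (List.mem_range.mp hy) (List.mem_range.mp hx)
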